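-- pv_equiv track=rewrite | github.com/nadiahpk/coauthorship-game | examples/deterministic/used_to_build/examples_fncs_11.py | list_valid_transitions
-- ===== SOURCE A (Python) =====
-- def list_valid_transitions(fsco_actions_2_ID):
--     # NOTE: this matrix is universal to all n-player games
--     #
--     # example: fsco_actions_2_ID for 2-player game
--     # {
--     #   ((0, 0), ((0,), (0,))): 0,
--     #   ((0, 1), ((0,), (0,))): 1,
--     #   ((0, 0), ((1,), (0,))): 2,
--     #   ...
--     #   ((1, 1), ((1,), (1,))): 15
--     # }
--
--
--     # format [(predecessor_1, successor_1), (predecessor_2, successor_2), ...]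
--     valid_transitions = list()
--
--     for (suc_fsactionV, suc_coactionsV), suc_ID in fsco_actions_2_ID.items():
--         # for each successor
--
--         # identify which players are not first-authoring in the successor
--         fs0_idxs = [idx for idx, fsaction in enumerate(suc_fsactionV) if fsaction == 0]
--
--         # identify the co-authorship memories associated with non-first-authoring player
--         suc_coactionsV_fs0 = [suc_coactionsV[fs0_idx] for fs0_idx in fs0_idxs]
--
--         for (pre_fsactionV, pre_coactionsV), pre_ID in fsco_actions_2_ID.items():
--             # for each predecessor
--
--             # transition from the predecessor to the successor is only permissible
--             # if the memories in the successor match the memories/actions in the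
--             # predecessor
--
--             # identify which players are not first-authoring in the predecessor
--             pre_coactionsV_fs0 = [pre_coactionsV[fs0_idx] for fs0_idx in fs0_idxs]
--
--             if pre_coactionsV_fs0 == suc_coactionsV_fs0:
--                 valid_transitions.append((pre_ID, suc_ID))
--
--     return valid_transitions
-- ===== SOURCE B (Python) =====
-- def list_valid_transitions(fsco_actions_2_ID):
--     # Index predecessors once per distinct fs0-index pattern: a dict from the
--     # restricted co-action tuple to the list of predecessor IDs (in order);
--     # each successor then does one lookup instead of scanning all predecessors.
--     items = list(fsco_actions_2_ID.items())
--     index = {}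
--     valid_transitions = []
--     for (suc_fsactionV, suc_coactionsV), suc_ID in items:
--         pat = tuple(idx for idx, fsaction in enumerate(suc_fsactionV) if fsaction == 0)
--         if pat not in index:
--             bucket = {}
--             for (_, pre_coactionsV), pre_ID in items:
--                 key = tuple(pre_coactionsV[i] for i in pat)
--                 bucket.setdefault(key, []).append(pre_ID)
--             index[pat] = bucket
--         key = tuple(suc_coactionsV[i] for i in pat)
--         valid_transitions.extend((pre_ID, suc_ID) for pre_ID in index[pat].get(key, []))
--     return valid_transitions
-- ===== Notes on version B (the rewrite author's own statement) =====
-- stated objective: alternative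
-- what changed: Instead of re-scanning all predecessors for every successor, B builds (lazily, once per distinct fs0-index pattern) a dict from restricted co-action tuple to the ordered list of predecessor IDs and answers each successor with one lookup.
import Mathlib
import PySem

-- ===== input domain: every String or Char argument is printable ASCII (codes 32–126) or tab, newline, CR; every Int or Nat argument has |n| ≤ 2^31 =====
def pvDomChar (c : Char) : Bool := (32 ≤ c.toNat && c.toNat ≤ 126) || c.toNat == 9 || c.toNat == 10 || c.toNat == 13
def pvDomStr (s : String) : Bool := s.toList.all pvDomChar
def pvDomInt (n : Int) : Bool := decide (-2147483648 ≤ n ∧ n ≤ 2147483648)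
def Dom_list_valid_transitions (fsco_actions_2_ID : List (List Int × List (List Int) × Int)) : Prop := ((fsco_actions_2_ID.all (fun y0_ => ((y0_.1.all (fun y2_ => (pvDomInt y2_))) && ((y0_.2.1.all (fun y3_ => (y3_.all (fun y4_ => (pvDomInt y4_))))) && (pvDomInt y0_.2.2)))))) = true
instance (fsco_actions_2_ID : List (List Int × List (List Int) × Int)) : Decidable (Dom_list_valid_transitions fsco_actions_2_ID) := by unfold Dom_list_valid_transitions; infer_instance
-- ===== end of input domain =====

-- B replaces A's successor×predecessor rescans by a per-pattern dict index of predecessors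
-- keyed by restricted co-action lists, looked up once per successor (objective: alternative algorithm).


-- ===== PORT A =====
-- shared helpers (both Pythons contain these two comprehensions verbatim):
-- [idx for idx, fsaction in enumerate(fsactionV) if fsaction == 0]
def pvFs0 (fsactionV : List Int) : List Int :=
  ((PySem.List.enumerate fsactionV 0).filter (fun p => p.2 == 0)).map (·.1)

-- [coactionsV[i] for i in pat]  (pyGetD: total stand-in for Python indexing; exact under Pre_)
def pvRestrict (coactionsV : List (List Int)) (pat : List Int) : List (List Int) :=
  pat.map (fun i => PySem.List.pyGetD coactionsV i [])

def list_valid_transitions (fsco_actions_2_ID : List (List Int × List (List Int) × Int)) : List (Int × Int) :=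
  fsco_actions_2_ID.foldl (fun valid_transitions suc =>
    let fs0_idxs := pvFs0 suc.1
    let suc_coactionsV_fs0 := pvRestrict suc.2.1 fs0_idxs
    fsco_actions_2_ID.foldl (fun acc pre =>
      let pre_coactionsV_fs0 := pvRestrict pre.2.1 fs0_idxs
      if pre_coactionsV_fs0 = suc_coactionsV_fs0 then acc ++ [(pre.2.2, suc.2.2)] else acc)
      valid_transitions) []

-- ===== PORT B =====
-- bucket for one pattern: restricted-co-actions key → predecessor IDs in order
-- (Python: bucket.setdefault(key, []).append(pre_ID))
def pvBucketFor (fsco_actions_2_ID : List (List Int × List (List Int) × Int)) (pat : List Int) :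
    PySem.Dict (List (List Int)) (List Int) :=
  fsco_actions_2_ID.foldl
    (fun bucket pre => bucket.modify (pvRestrict pre.2.1 pat) [] (· ++ [pre.2.2]))
    PySem.Dict.empty

-- one iteration of B's successor loop, carrying (index cache, output)
def pvStep (fsco_actions_2_ID : List (List Int × List (List Int) × Int))
    (st : PySem.Dict (List Int) (PySem.Dict (List (List Int)) (List Int)) × List (Int × Int))
    (suc : List Int × List (List Int) × Int) :
    PySem.Dict (List Int) (PySem.Dict (List (List Int)) (List Int)) × List (Int × Int) :=
  let pat := pvFs0 suc.1
  let index := if st.1.contains pat then st.1 else st.1.insert pat (pvBucketFor fsco_actions_2_ID pat)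
  let key := pvRestrict suc.2.1 pat
  let hits := ((index.get? pat).getD PySem.Dict.empty).getD key []
  (index, st.2 ++ hits.map (fun pid => (pid, suc.2.2)))

def list_valid_transitions_alt (fsco_actions_2_ID : List (List Int × List (List Int) × Int)) : List (Int × Int) :=
  (fsco_actions_2_ID.foldl (pvStep fsco_actions_2_ID) (PySem.Dict.empty, [])).2

-- ===== PRECONDITION & SPEC =====
-- Pre_ excludes exactly the inputs where Python A raises IndexError (some entry's
-- co-action list is too short for an fs0 index of some entry); Python B raises there too.
def Pre_list_valid_transitions (fsco_actions_2_ID : List (List Int × List (List Int) × Int)) : Prop :=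
  ∀ s ∈ fsco_actions_2_ID, ∀ p ∈ fsco_actions_2_ID,
    ∀ i ∈ List.range s.1.length, s.1.getD i 1 = 0 → i < p.2.1.length
instance (fsco_actions_2_ID : List (List Int × List (List Int) × Int)) : Decidable (Pre_list_valid_transitions fsco_actions_2_ID) := by unfold Pre_list_valid_transitions; infer_instance

def pvWitness_list_valid_transitions : (List (List Int × List (List Int) × Int)) :=
  [([0, 1], ([[0], [0]], 0)), ([1, 0], ([[1], [0]], 1))]

def Spec_list_valid_transitions (fsco_actions_2_ID : List (List Int × List (List Int) × Int)) (out : List (Int × Int)) : Prop := out = list_valid_transitions_alt fsco_actions_2_ID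
instance (fsco_actions_2_ID : List (List Int × List (List Int) × Int)) (out : List (Int × Int)) : Decidable (Spec_list_valid_transitions fsco_actions_2_ID out) := by unfold Spec_list_valid_transitions; infer_instance

-- ===== CLAIM (what is proved, stated in full; the proofs are below) =====
def Claim_equal_list_valid_transitions : Prop := ∀ (fsco_actions_2_ID : List (List Int × List (List Int) × Int)), Dom_list_valid_transitions fsco_actions_2_ID → Pre_list_valid_transitions fsco_actions_2_ID → Spec_list_valid_transitions fsco_actions_2_ID (list_valid_transitions fsco_actions_2_ID)

-- ===== LEMMAS AND PROOFS =====

-- canonical value of one successor's contribution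
def pvMatches (L : List (List Int × List (List Int) × Int)) (suc : List Int × List (List Int) × Int) :
    List (Int × Int) :=
  (L.filter (fun pre => decide (pvRestrict pre.2.1 (pvFs0 suc.1) = pvRestrict suc.2.1 (pvFs0 suc.1)))).map
    (fun pre => (pre.2.2, suc.2.2))

lemma pvA_eq (L : List (List Int × List (List Int) × Int)) :
    list_valid_transitions L = L.flatMap (pvMatches L) := by
  simp only [list_valid_transitions]
  have h : ∀ (acc : List (Int × Int)) (suc : List Int × List (List Int) × Int), suc ∈ L →
      L.foldl (fun acc2 pre =>
        if pvRestrict pre.2.1 (pvFs0 suc.1) = pvRestrict suc.2.1 (pvFs0 suc.1)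
        then acc2 ++ [(pre.2.2, suc.2.2)] else acc2) acc
      = acc ++ pvMatches L suc := by
    intro acc suc _
    exact PySem.List.foldl_append_ite
      (p := fun (pre : List Int × List (List Int) × Int) => pvRestrict pre.2.1 (pvFs0 suc.1) = pvRestrict suc.2.1 (pvFs0 suc.1))
      (f := fun (pre : List Int × List (List Int) × Int) => (pre.2.2, suc.2.2)) ..
  refine (PySem.List.foldl_congr_mem L _ (fun acc suc => acc ++ pvMatches L suc) [] h).trans ?_
  rw [PySem.List.foldl_append_eq_flatMap, List.nil_append]

lemma pvBucket_getD (L : List (List Int × List (List Int) × Int)) (pat : List Int) (k : List (List Int)) :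
    (pvBucketFor L pat).getD k []
      = (L.filter (fun pre => decide (pvRestrict pre.2.1 pat = k))).map (·.2.2) := by
  unfold pvBucketFor
  rw [show (L.foldl (fun bucket pre => bucket.modify (pvRestrict pre.2.1 pat) [] (· ++ [pre.2.2]))
        PySem.Dict.empty)
      = ((L.map (fun pre => (pvRestrict pre.2.1 pat, pre.2.2))).foldl
          (fun d p => d.modify p.1 [] (· ++ [p.2])) PySem.Dict.empty) from (List.foldl_map (f := fun (pre : List Int × List (List Int) × Int) => (pvRestrict pre.2.1 pat, pre.2.2)) (g := fun (d : PySem.Dict (List (List Int)) (List Int)) (p : List (List Int) × Int) => d.modify p.1 [] (· ++ [p.2]))).symm]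
  rw [PySem.Dict.getD_foldl_modify_append, PySem.Dict.getD_empty, List.nil_append,
    List.filter_map, List.map_map]
  congr 1
  apply List.filter_congr
  intro pre _
  simp [Bool.beq_eq_decide_eq]

-- B's per-successor contribution
def pvContrib (L : List (List Int × List (List Int) × Int)) (suc : List Int × List (List Int) × Int) :
    List (Int × Int) :=
  ((pvBucketFor L (pvFs0 suc.1)).getD (pvRestrict suc.2.1 (pvFs0 suc.1)) []).map
    (fun pid => (pid, suc.2.2))

lemma pvB_loop (L : List (List Int × List (List Int) × Int)) :
    ∀ (rest : List (List Int × List (List Int) × Int))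
      (index : PySem.Dict (List Int) (PySem.Dict (List (List Int)) (List Int)))
      (out : List (Int × Int)),
      (∀ p b, index.get? p = some b → b = pvBucketFor L p) →
      (rest.foldl (pvStep L) (index, out)).2 = out ++ rest.flatMap (pvContrib L) := by
  intro rest
  induction rest with
  | nil => intro index out _; simp
  | cons suc rest ih =>
    intro index out hinv
    simp only [List.foldl_cons, List.flatMap_cons]
    by_cases hc : index.contains (pvFs0 suc.1)
    · -- pattern already cached
      have hsome : (index.get? (pvFs0 suc.1)).isSome := by
        rw [← PySem.Dict.contains_eq_isSome_get?]; exact hc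
      obtain ⟨b, hb⟩ := Option.isSome_iff_exists.mp hsome
      have hbv := hinv _ _ hb
      have hstep : pvStep L (index, out) suc
          = (index, out ++ pvContrib L suc) := by
        simp only [pvStep]
        rw [if_pos hc, hb]
        simp [pvContrib, hbv]
      rw [hstep, ih index _ hinv, List.append_assoc]
    · -- pattern freshly inserted
      have hstep : pvStep L (index, out) suc
          = (index.insert (pvFs0 suc.1) (pvBucketFor L (pvFs0 suc.1)), out ++ pvContrib L suc) := by
        simp only [pvStep]
        rw [if_neg hc, PySem.Dict.get?_insert_self]
        simp [pvContrib]
      rw [hstep]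
      have hinv' : ∀ p b,
          (index.insert (pvFs0 suc.1) (pvBucketFor L (pvFs0 suc.1))).get? p = some b →
          b = pvBucketFor L p := by
        intro p b hpb
        rw [PySem.Dict.get?_insert] at hpb
        by_cases hp : p = pvFs0 suc.1
        · rw [if_pos hp] at hpb; cases hpb; rw [hp]
        · rw [if_neg hp] at hpb; exact hinv _ _ hpb
      rw [ih _ _ hinv', List.append_assoc]

lemma pvB_eq (L : List (List Int × List (List Int) × Int)) :
    list_valid_transitions_alt L = L.flatMap (pvContrib L) := by
  unfold list_valid_transitions_alt
  rw [pvB_loop L L PySem.Dict.empty []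
    (by intro p b hb; rw [PySem.Dict.get?_empty] at hb; cases hb), List.nil_append]

lemma pvContrib_eq_pvMatches (L : List (List Int × List (List Int) × Int))
    (suc : List Int × List (List Int) × Int) : pvContrib L suc = pvMatches L suc := by
  unfold pvContrib pvMatches
  rw [pvBucket_getD, List.map_map]
  rfl

-- ===== VERDICT (by name: the statement is the Claim_ definition above) =====
theorem list_valid_transitions_spec : Claim_equal_list_valid_transitions := by
  intro L _ _
  unfold Spec_list_valid_transitions
  rw [pvA_eq, pvB_eq]
  exact (List.flatMap_congr (fun suc _ => (pvContrib_eq_pvMatches L suc).symm))
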